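-- pv_equiv track=rewrite | github.com/Acetylene5/BlurryApple | Diagnostics/calc_xy.py | findContiguousRegions
-- ===== SOURCE A (Python) =====
-- def findRegion(x, y, regions):
--     for r in range(len(regions)):
--         for pix in regions[r]:
--             if (abs(x-pix[0]) < 2) & (abs(y-pix[1]) < 2):
--                 return r
--     return -1
--
-- def findContiguousRegions(nonzero):
--     regions = []
--     for x, y in zip(nonzero[0], nonzero[1]):
--         index = findRegion(x, y, regions)
--         if index >= 0:
--             regions[index].append([x, y])
--         else:
--             regions.append([[x,y]])
--     return regions
-- ===== SOURCE B (Python) =====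
-- def findContiguousRegions(nonzero):
--     regions = []
--     best = {}  # (x, y) -> smallest index of a region containing that pixel
--     for x, y in zip(nonzero[0], nonzero[1]):
--         cand = [best[(x + dx, y + dy)]
--                 for dx in (-1, 0, 1) for dy in (-1, 0, 1)
--                 if (x + dx, y + dy) in best]
--         if cand:
--             index = min(cand)
--             regions[index].append([x, y])
--         else:
--             index = len(regions)
--             regions.append([[x, y]])
--         if (x, y) not in best or index < best[(x, y)]:
--             best[(x, y)] = index
--     return regions
-- ===== Notes on version B (the rewrite author's own statement) =====
-- stated objective: faster
-- what changed: B replaces A's rescan of every pixel of every existing region per new pixel with a spatial hash mapping each coordinate to the smallest index of a region containing it, so each pixel is placed by looking up only its 9 neighbouring cells.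
import Mathlib
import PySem

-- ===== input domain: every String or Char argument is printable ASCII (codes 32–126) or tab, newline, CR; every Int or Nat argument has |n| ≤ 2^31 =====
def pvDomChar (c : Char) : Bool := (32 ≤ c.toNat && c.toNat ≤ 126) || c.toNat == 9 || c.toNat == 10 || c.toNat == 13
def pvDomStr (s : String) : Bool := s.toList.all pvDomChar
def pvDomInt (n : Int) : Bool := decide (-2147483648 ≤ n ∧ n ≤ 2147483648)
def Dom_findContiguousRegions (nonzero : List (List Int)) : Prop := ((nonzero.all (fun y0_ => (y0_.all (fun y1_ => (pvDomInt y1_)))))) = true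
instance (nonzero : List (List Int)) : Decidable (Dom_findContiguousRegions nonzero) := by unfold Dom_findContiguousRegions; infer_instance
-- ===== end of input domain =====

-- B replaces A's rescan of every pixel of every region with a spatial hash (coord -> smallest
-- region index holding that coord) queried at the 9 neighbouring cells; same return value.

-- ===== PORT A =====
-- pix is always a two-element [x, y] list built by A itself; Python would raise IndexError on a
-- shorter pix, which is unreachable, so the catch-all returns false.
def pixNear (x y : Int) (pix : List Int) : Bool :=
  match pix with
  | px :: py :: _ => decide ((x - px).natAbs < 2) && decide ((y - py).natAbs < 2)
  | _ => false

def findRegionAux (x y : Int) (regions : List (List (List Int))) (r : Int) : Int :=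
  match regions with
  | [] => -1
  | reg :: rest => if reg.any (pixNear x y) then r else findRegionAux x y rest (r + 1)

def findRegion (x y : Int) (regions : List (List (List Int))) : Int :=
  findRegionAux x y regions 0

def stepA (regions : List (List (List Int))) (p : Int × Int) : List (List (List Int)) :=
  let index := findRegion p.1 p.2 regions
  if 0 ≤ index then regions.modify index.toNat (fun reg => reg ++ [[p.1, p.2]])
  else regions ++ [[[p.1, p.2]]]

def findContiguousRegions (nonzero : List (List Int)) : List (List (List Int)) :=
  match PySem.List.pyGet? nonzero 0, PySem.List.pyGet? nonzero 1 with
  | some xs, some ys => (xs.zip ys).foldl stepA []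
  | _, _ => []  -- IndexError in Python; excluded by Pre_

-- ===== PORT B =====
def neighborCells (x y : Int) : List (Int × Int) :=
  [(-1 : Int), 0, 1].flatMap (fun dx => [(-1 : Int), 0, 1].map (fun dy => (x + dx, y + dy)))

-- if (x, y) not in best or index < best[(x, y)]: best[(x, y)] = index
def updBest (best : PySem.Dict (Int × Int) Int) (x y index : Int) : PySem.Dict (Int × Int) Int :=
  match best.get? (x, y) with
  | none => best.insert (x, y) index
  | some old => if index < old then best.insert (x, y) index else best

def stepB (st : List (List (List Int)) × PySem.Dict (Int × Int) Int) (p : Int × Int) :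
    List (List (List Int)) × PySem.Dict (Int × Int) Int :=
  let cand := (neighborCells p.1 p.2).filterMap (fun c => st.2.get? c)
  match PySem.List.min? cand (fun v => v) with
  | some index =>
      (st.1.modify index.toNat (fun reg => reg ++ [[p.1, p.2]]), updBest st.2 p.1 p.2 index)
  | none =>
      (st.1 ++ [[[p.1, p.2]]], updBest st.2 p.1 p.2 (st.1.length : Int))

def findContiguousRegions_alt (nonzero : List (List Int)) : List (List (List Int)) :=
  match PySem.List.pyGet? nonzero 0 with
  | none => []  -- IndexError in Python; excluded by Pre_
  | some xs =>
    match PySem.List.pyGet? nonzero 1 with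
    | none => []
    | some ys => ((xs.zip ys).foldl stepB ([], PySem.Dict.empty)).1

-- ===== PRECONDITION & SPEC =====
-- A evaluates nonzero[0] and nonzero[1]: on lists with fewer than two rows Python raises IndexError.
def Pre_findContiguousRegions (nonzero : List (List Int)) : Prop := 2 ≤ nonzero.length
instance (nonzero : List (List Int)) : Decidable (Pre_findContiguousRegions nonzero) := by
  unfold Pre_findContiguousRegions; infer_instance

def pvWitness_findContiguousRegions : List (List Int) := [[0, 1, 5], [0, 0, 5]]

def Spec_findContiguousRegions (nonzero : List (List Int)) (out : List (List (List Int))) : Prop :=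
  out = findContiguousRegions_alt nonzero
instance (nonzero : List (List Int)) (out : List (List (List Int))) : Decidable (Spec_findContiguousRegions nonzero out) := by
  unfold Spec_findContiguousRegions; infer_instance

-- ===== CLAIM (what is proved, stated in full; the proofs are below) =====
def Claim_equal_findContiguousRegions : Prop := ∀ (nonzero : List (List Int)), Dom_findContiguousRegions nonzero → Pre_findContiguousRegions nonzero → Spec_findContiguousRegions nonzero (findContiguousRegions nonzero)

-- ===== LEMMAS AND PROOFS =====

-- predicate "region reg contains the pixel at coordinate c"
def memP (c : Int × Int) (reg : List (List Int)) : Bool := decide ([c.1, c.2] ∈ reg)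

-- every stored pixel is a two-element list
def WFregions (regions : List (List (List Int))) : Prop :=
  ∀ reg ∈ regions, ∀ pix ∈ reg, ∃ a b : Int, pix = [a, b]

-- the spatial hash maps each coordinate to the first (= smallest) region index containing it
def StInv (regions : List (List (List Int))) (best : PySem.Dict (Int × Int) Int) : Prop :=
  WFregions regions ∧
  ∀ c : Int × Int, best.get? c = (regions.findIdx? (memP c)).map Int.ofNat

lemma findIdx?_congr {α : Type} (p q : α → Bool) (L : List α) (h : ∀ a ∈ L, p a = q a) :
    L.findIdx? p = L.findIdx? q := by
  induction L with
  | nil => rfl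
  | cons a t ih =>
    simp only [List.findIdx?_cons, h a (by simp)]
    rw [ih (fun b hb => h b (by simp [hb]))]

lemma findRegionAux_eq (x y : Int) (regions : List (List (List Int))) (r : Int) :
    findRegionAux x y regions r =
      match regions.findIdx? (fun reg => reg.any (pixNear x y)) with
      | some n => r + (n : Int)
      | none => -1 := by
  induction regions generalizing r with
  | nil => rfl
  | cons reg rest ih =>
    simp only [findRegionAux, List.findIdx?_cons]
    by_cases h : reg.any (pixNear x y)
    · simp [h]
    · simp only [h, Bool.false_eq_true, if_false, ih (r + 1)]
      cases hf : rest.findIdx? (fun reg => reg.any (pixNear x y)) with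
      | none => simp
      | some n =>
        simp only [Option.map_some]
        push_cast
        ring

lemma mem_neighborCells (a b x y : Int) :
    (a, b) ∈ neighborCells x y ↔ ((x - a).natAbs < 2 ∧ (y - b).natAbs < 2) := by
  simp [neighborCells, Prod.ext_iff]
  omega

lemma any_pixNear_eq (x y : Int) (reg : List (List Int))
    (h : ∀ pix ∈ reg, ∃ a b : Int, pix = [a, b]) :
    reg.any (pixNear x y) = (neighborCells x y).any (fun c => memP c reg) := by
  rw [Bool.eq_iff_iff]
  simp only [List.any_eq_true]
  constructor
  · rintro ⟨pix, hpix, hnear⟩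
    obtain ⟨a, b, rfl⟩ := h pix hpix
    simp only [pixNear, Bool.and_eq_true, decide_eq_true_eq] at hnear
    exact ⟨(a, b), (mem_neighborCells a b x y).mpr hnear, by simpa [memP] using hpix⟩
  · rintro ⟨c, hc, hm⟩
    refine ⟨[c.1, c.2], by simpa [memP] using hm, ?_⟩
    have := (mem_neighborCells c.1 c.2 x y).mp (by simpa using hc)
    simp [pixNear, this.1, this.2]

lemma min?_cand (C : List (Int × Int)) (L : List (List (List Int))) :
    PySem.List.min? (C.filterMap (fun c => (L.findIdx? (memP c)).map Int.ofNat)) (fun v => v)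
      = (L.findIdx? (fun reg => C.any (fun c => memP c reg))).map Int.ofNat := by
  cases hf : L.findIdx? (fun reg => C.any (fun c => memP c reg)) with
  | none =>
    have hall := List.findIdx?_eq_none_iff.mp hf
    have hnil : C.filterMap (fun c => (L.findIdx? (memP c)).map Int.ofNat) = [] := by
      rw [List.filterMap_eq_nil_iff]
      intro c hc
      have : L.findIdx? (memP c) = none := by
        rw [List.findIdx?_eq_none_iff]
        intro reg hreg
        by_contra hcontra
        have : (C.any (fun c => memP c reg)) = true :=
          List.any_eq_true.mpr ⟨c, hc, by simpa using hcontra⟩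
        simp [hall reg hreg] at this
      simp [this]
    rw [hnil]
    simp [PySem.List.min?_eq_none_iff]
  | some k =>
    obtain ⟨hk, hany, hpre⟩ := List.findIdx?_eq_some_iff_getElem.mp hf
    obtain ⟨c0, hc0, hc0mem⟩ := List.any_eq_true.mp hany
    -- first region containing coordinate c0 is exactly k
    have hidx0 : L.findIdx? (memP c0) = some k := by
      rw [List.findIdx?_eq_some_iff_getElem]
      refine ⟨hk, hc0mem, fun j hj => ?_⟩
      intro hbad
      exact hpre j hj (List.any_eq_true.mpr ⟨c0, hc0, hbad⟩)
    have hkmem : Int.ofNat k ∈ C.filterMap (fun c => (L.findIdx? (memP c)).map Int.ofNat) :=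
      List.mem_filterMap.mpr ⟨c0, hc0, by rw [hidx0]; rfl⟩
    have hle : ∀ v ∈ C.filterMap (fun c => (L.findIdx? (memP c)).map Int.ofNat), Int.ofNat k ≤ v := by
      intro v hv
      obtain ⟨c, hc, hvc⟩ := List.mem_filterMap.mp hv
      cases hvx : L.findIdx? (memP c) with
      | none => rw [hvx] at hvc; simp at hvc
      | some m =>
        rw [hvx, Option.map_some, Option.some.injEq] at hvc
        subst hvc
        obtain ⟨hmlt, hmmem, _⟩ := List.findIdx?_eq_some_iff_getElem.mp hvx
        have : k ≤ m := by
          by_contra hlt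
          exact hpre m (by omega) (List.any_eq_true.mpr ⟨c, hc, hmmem⟩)
        simp only [Int.ofNat_eq_natCast]
        exact_mod_cast this
    cases hmin : PySem.List.min? (C.filterMap (fun c => (L.findIdx? (memP c)).map Int.ofNat)) (fun v => v) with
    | none =>
      rw [PySem.List.min?_eq_none_iff] at hmin
      rw [hmin] at hkmem
      exact (List.not_mem_nil hkmem).elim
    | some m0 =>
      have h1 := PySem.List.min?_mem hmin
      have h2 := PySem.List.min?_isMin hmin _ hkmem
      have h3 := hle m0 h1
      rw [Option.map_some, Option.some.injEq]
      omega

lemma mem_modify {α : Type} (L : List α) (n : Nat) (f : α → α) (a : α)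
    (ha : a ∈ L.modify n f) : a ∈ L ∨ ∃ b ∈ L, a = f b := by
  obtain ⟨j, hj, rfl⟩ := List.mem_iff_getElem.mp ha
  rw [List.getElem_modify]
  by_cases hnj : n = j
  · subst hnj
    right
    exact ⟨L[n]'(by simpa using hj), by simp [List.getElem_mem], by simp⟩
  · left
    simp [hnj, List.getElem_mem]

lemma findIdx?_modify_eq {α : Type} (L : List α) (n : Nat) (f : α → α) (p : α → Bool)
    (h : ∀ (hn : n < L.length), p (f L[n]) = p L[n]) :
    (L.modify n f).findIdx? p = L.findIdx? p := by
  have hmap : (L.modify n f).map p = L.map p := by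
    apply List.ext_getElem
    · simp
    · intro i h1 h2
      simp only [List.getElem_map, List.getElem_modify]
      by_cases hni : n = i
      · subst hni; simp at h2 ⊢; exact h (by simpa using h2)
      · simp [hni]
  have e1 : (L.modify n f).findIdx? p = ((L.modify n f).map p).findIdx? (fun b => b) := by
    rw [List.findIdx?_map]; rfl
  have e2 : L.findIdx? p = (L.map p).findIdx? (fun b => b) := by
    rw [List.findIdx?_map]; rfl
  rw [e1, e2, hmap]

lemma self_mem_neighborCells (x y : Int) : (x, y) ∈ neighborCells x y :=
  (mem_neighborCells x y x y).mpr (by omega)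

lemma ne_pixlist {c : Int × Int} {x y : Int} (h : c ≠ (x, y)) :
    ([c.1, c.2] : List Int) ≠ [x, y] := by
  intro hbad
  apply h
  simp only [List.cons.injEq, and_true] at hbad
  exact Prod.ext hbad.1 hbad.2

lemma updBest_none (best : PySem.Dict (Int × Int) Int) (x y i : Int)
    (h : best.get? (x, y) = none) : updBest best x y i = best.insert (x, y) i := by
  rw [updBest, h]

lemma updBest_some (best : PySem.Dict (Int × Int) Int) (x y i old : Int)
    (h : best.get? (x, y) = some old) :
    updBest best x y i = if i < old then best.insert (x, y) i else best := by
  rw [updBest, h]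

lemma step_main (regions : List (List (List Int))) (best : PySem.Dict (Int × Int) Int)
    (p : Int × Int) (h : StInv regions best) :
    stepA regions p = (stepB (regions, best) p).1 ∧
      StInv (stepB (regions, best) p).1 (stepB (regions, best) p).2 := by
  obtain ⟨hwf, hbest⟩ := h
  set x := p.1 with hx
  set y := p.2 with hy
  set C := neighborCells x y with hC
  set q : List (List Int) → Bool := fun reg => C.any (fun c => memP c reg) with hq
  -- the candidate list of B equals the findIdx?-image of the 9 cells
  have hcand : (C.filterMap (fun c => best.get? c))
      = C.filterMap (fun c => (regions.findIdx? (memP c)).map Int.ofNat) :=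
    List.filterMap_congr (fun c _ => hbest c)
  have hminq : PySem.List.min? (C.filterMap (fun c => best.get? c)) (fun v => v)
      = (regions.findIdx? q).map Int.ofNat := by
    rw [hcand, min?_cand]
  -- A's scan finds the same index
  have hfidx : regions.findIdx? (fun reg => reg.any (pixNear x y)) = regions.findIdx? q :=
    findIdx?_congr _ _ _ (fun reg hreg => any_pixNear_eq x y reg (hwf reg hreg))
  have hfr : findRegion x y regions =
      match regions.findIdx? q with
      | some n => (n : Int)
      | none => -1 := by
    rw [findRegion, findRegionAux_eq, hfidx]
    cases regions.findIdx? q <;> simp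
  have hself : (x, y) ∈ C := self_mem_neighborCells x y
  cases hf : regions.findIdx? q with
  | none =>
    -- no region touches any of the 9 cells: both append a fresh region
    have hall := List.findIdx?_eq_none_iff.mp hf
    have hxy_none : regions.findIdx? (memP (x, y)) = none := by
      rw [List.findIdx?_eq_none_iff]
      intro reg hreg
      by_contra hbad
      have : q reg = true := List.any_eq_true.mpr ⟨(x, y), hself, by simpa using hbad⟩
      simp [hall reg hreg] at this
    have hgetxy : best.get? (x, y) = none := by rw [hbest, hxy_none]; rfl
    have hstepB : stepB (regions, best) p =
        (regions ++ [[[x, y]]], best.insert (x, y) (regions.length : Int)) := by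
      rw [stepB]
      simp only [← hx, ← hy, ← hC, hminq, hf, Option.map_none]
      rw [updBest_none best x y _ hgetxy]
    have hstepA : stepA regions p = regions ++ [[[x, y]]] := by
      rw [stepA]
      simp only [← hx, ← hy, hfr, hf]
      norm_num
    refine ⟨by rw [hstepA, hstepB], ?_⟩
    rw [hstepB]
    constructor
    · intro reg hreg pix hpix
      rcases List.mem_append.mp hreg with h1 | h1
      · exact hwf reg h1 pix hpix
      · simp at h1; subst h1; simp at hpix; exact ⟨x, y, hpix⟩
    · intro c
      rw [PySem.Dict.get?_insert]
      by_cases hcxy : c = (x, y)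
      · subst hcxy
        rw [if_pos rfl, List.findIdx?_append, hxy_none]
        have hone : List.findIdx? (memP ((x, y) : Int × Int)) [[[x, y]]] = some 0 := by
          simp [List.findIdx?_cons, memP]
        simp [hone]
      · rw [if_neg hcxy, hbest c, List.findIdx?_append]
        have hnone : List.findIdx? (memP c) [[[x, y]]] = none := by
          simp [List.findIdx?_cons, memP, ne_pixlist hcxy]
        simp [hnone]
  | some n =>
    -- some region touches a neighbouring cell: both append the pixel to region n
    obtain ⟨hklen, hkany, hkpre⟩ := List.findIdx?_eq_some_iff_getElem.mp hf
    have hstepB : stepB (regions, best) p =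
        (regions.modify n (fun reg => reg ++ [[x, y]]), updBest best x y (Int.ofNat n)) := by
      rw [stepB]
      simp only [← hx, ← hy, ← hC, hminq, hf, Option.map_some, Int.ofNat_eq_natCast,
        Int.toNat_natCast]
    have hstepA : stepA regions p = regions.modify n (fun reg => reg ++ [[x, y]]) := by
      rw [stepA]
      simp only [← hx, ← hy, hfr, hf]
      rw [if_pos (by positivity), Int.toNat_natCast]
    refine ⟨by rw [hstepA, hstepB], ?_⟩
    rw [hstepB]
    constructor
    · intro reg hreg pix hpix
      rcases mem_modify _ _ _ _ hreg with h1 | ⟨b, hb, rfl⟩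
      · exact hwf reg h1 pix hpix
      · rcases List.mem_append.mp hpix with h2 | h2
        · exact hwf b hb pix h2
        · simp at h2; exact ⟨x, y, h2⟩
    · intro c
      by_cases hcxy : c = (x, y)
      · subst hcxy
        -- new first-region index of (x, y) is n
        have hrhs : (regions.modify n (fun reg => reg ++ [[x, y]])).findIdx? (memP (x, y)) = some n := by
          rw [List.findIdx?_eq_some_iff_getElem]
          refine ⟨by simpa using hklen, ?_, ?_⟩
          · rw [List.getElem_modify, if_pos rfl]
            simp [memP]
          · intro j hj
            rw [List.getElem_modify, if_neg (by omega)]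
            intro hbad
            exact hkpre j hj (List.any_eq_true.mpr ⟨(x, y), hself, by simpa using hbad⟩)
        rw [hrhs]
        have hold := hbest (x, y)
        cases hfx : regions.findIdx? (memP ((x, y) : Int × Int)) with
        | none =>
          rw [hfx] at hold
          rw [updBest_none best x y _ hold, PySem.Dict.get?_insert, if_pos rfl]
          rfl
        | some m =>
          rw [hfx, Option.map_some] at hold
          obtain ⟨hmlt, hmmem, _⟩ := List.findIdx?_eq_some_iff_getElem.mp hfx
          have hnm : n ≤ m := by
            by_contra hlt
            exact hkpre m (by omega) (List.any_eq_true.mpr ⟨(x, y), hself, hmmem⟩)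
          rw [updBest_some best x y _ _ hold]
          by_cases hltc : Int.ofNat n < Int.ofNat m
          · rw [if_pos hltc, PySem.Dict.get?_insert, if_pos rfl]
            rfl
          · rw [if_neg hltc, hold]
            have : m = n := by simp only [Int.ofNat_eq_natCast] at hltc; omega
            subst this
            rfl
      · -- any other coordinate: neither side changes
        have hrhs : (regions.modify n (fun reg => reg ++ [[x, y]])).findIdx? (memP c)
            = regions.findIdx? (memP c) := by
          apply findIdx?_modify_eq
          intro hn
          simp [memP, ne_pixlist hcxy]
        rw [hrhs, ← hbest c]
        cases hgx : best.get? (x, y) with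
        | none =>
          rw [updBest_none best x y _ hgx, PySem.Dict.get?_insert, if_neg hcxy]
        | some old =>
          rw [updBest_some best x y _ _ hgx]
          by_cases hlt : Int.ofNat n < old
          · rw [if_pos hlt, PySem.Dict.get?_insert, if_neg hcxy]
          · rw [if_neg hlt]

lemma loop_eq (ps : List (Int × Int)) (regions : List (List (List Int)))
    (best : PySem.Dict (Int × Int) Int) (h : StInv regions best) :
    ps.foldl stepA regions = (ps.foldl stepB (regions, best)).1 := by
  induction ps generalizing regions best with
  | nil => rfl
  | cons p t ih =>
    obtain ⟨heq, hinv⟩ := step_main regions best p h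
    simp only [List.foldl_cons, heq]
    have := ih (stepB (regions, best) p).1 (stepB (regions, best) p).2 hinv
    rw [this]

lemma StInv_init : StInv [] PySem.Dict.empty := by
  constructor
  · intro reg hreg; simp at hreg
  · intro c; simp [PySem.Dict.get?_empty]

-- ===== VERDICT (by name: the statement is the Claim_ definition above) =====
theorem findContiguousRegions_spec : Claim_equal_findContiguousRegions := by
  intro nonzero _ hpre
  unfold Spec_findContiguousRegions
  match nonzero, hpre with
  | a :: b :: t, _ =>
    have h0 : PySem.List.pyGet? (a :: b :: t) 0 = some a := by
      have e : (0 : Int) = ((0 : Nat) : Int) := rfl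
      rw [e, PySem.List.pyGet?_natCast]; rfl
    have h1 : PySem.List.pyGet? (a :: b :: t) 1 = some b := by
      have e : (1 : Int) = ((1 : Nat) : Int) := rfl
      rw [e, PySem.List.pyGet?_natCast]; rfl
    unfold findContiguousRegions findContiguousRegions_alt
    rw [h0, h1]
    exact loop_eq (a.zip b) [] PySem.Dict.empty StInv_init
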